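-- pv_equiv track=rewrite | github.com/ericmerle3789/Collatz-Junction-Theorem | scripts/research/r45_m2_anatomy.py | brute_P_B
-- ===== SOURCE A (Python) =====
-- def brute_P_B(B_vec, g, mod):
--     """Compute P_B(g) = sum_{j=0}^{k-1} g^j * 2^{B_j} mod m."""
--     k = len(B_vec)
--     result = 0
--     gj = 1
--     for j in range(k):
--         result = (result + gj * pow(2, B_vec[j], mod)) % mod
--         gj = (gj * g) % mod
--     return result
-- ===== SOURCE B (Python) =====
-- def brute_P_B(B_vec, g, mod):
--     """Compute P_B(g) = sum_{j=0}^{k-1} g^j * 2^{B_j} mod m by Horner's rule: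
--     walk the coefficients back to front with a single accumulator."""
--     result = 0
--     i = len(B_vec)
--     while i:
--         i -= 1
--         result = (result * g + pow(2, B_vec[i], mod)) % mod
--     return result
-- ===== Notes on version B (the rewrite author's own statement) =====
-- stated objective: alternative
-- what changed: B evaluates the polynomial by Horner's rule with a back-to-front while loop over a manually decremented index and a single accumulator, eliminating A's second maintained accumulator (the running power g^j) and reversing the traversal direction.
import Mathlib
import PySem

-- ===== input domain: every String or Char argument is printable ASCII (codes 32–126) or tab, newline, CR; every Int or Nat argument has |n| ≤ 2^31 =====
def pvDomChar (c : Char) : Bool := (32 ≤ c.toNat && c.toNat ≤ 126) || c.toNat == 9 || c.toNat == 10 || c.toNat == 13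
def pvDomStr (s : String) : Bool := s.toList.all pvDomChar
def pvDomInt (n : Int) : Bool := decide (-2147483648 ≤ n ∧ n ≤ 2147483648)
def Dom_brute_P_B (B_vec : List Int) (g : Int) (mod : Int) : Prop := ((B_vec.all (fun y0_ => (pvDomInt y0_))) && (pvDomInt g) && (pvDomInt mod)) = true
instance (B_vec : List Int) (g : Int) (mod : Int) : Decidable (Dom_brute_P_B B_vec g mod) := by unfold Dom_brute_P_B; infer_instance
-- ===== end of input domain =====

-- B evaluates the same polynomial by Horner's rule, walking the list back-to-front on a decremented index with a single accumulator, replacing A's forward loop with its running-power accumulator; proved equal to A on Pre_.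


-- ===== PORT A =====
-- shared helper: Python's built-in pow(2, e, m), called identically by A and B.
-- e ≥ 0: PySem.Int.powMod (exact).  e < 0 (kept by Pre_ only for odd m): Python computes the modular
-- inverse of 2, which for odd m is (m+1)//2 in Python's residue range, then powers it; ported as
-- square-and-multiply so the port is evaluable on large |e| (same canonical residue at every step).
def pvPowMod (bse : Int) (n : Nat) (m : Int) : Int :=
  if h : n = 0 then PySem.Int.mod 1 m
  else
    let hf := pvPowMod bse (n / 2) m
    if n % 2 = 0 then PySem.Int.mod (hf * hf) m
    else PySem.Int.mod (hf * hf * bse) m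
decreasing_by exact Nat.div_lt_self (Nat.pos_of_ne_zero h) one_lt_two

def pyPow2Mod (e m : Int) : Int :=
  if 0 ≤ e then PySem.Int.powMod 2 e.toNat m
  else pvPowMod (PySem.Int.floordiv (m + 1) 2) (-e).toNat m

def brute_P_B (B_vec : List Int) (g : Int) (mod : Int) : Int :=
  -- k = len(B_vec); result = 0; gj = 1; for j in range(k): …
  ((PySem.List.pyRange 0 (B_vec.length : Int) 1).foldl
    (fun (st : Int × Int) j =>
      (PySem.Int.mod (st.1 + st.2 * pyPow2Mod (PySem.List.pyGetD B_vec j 0) mod) mod,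
       PySem.Int.mod (st.2 * g) mod))
    (0, 1)).1

-- ===== PORT B =====
-- result = 0; i = len(B_vec); while i: i -= 1; result = (result * g + pow(2, B_vec[i], mod)) % mod
def pvAltLoop (B_vec : List Int) (g m : Int) : Nat → Int → Int
  | 0, result => result
  | i + 1, result =>
      pvAltLoop B_vec g m i
        (PySem.Int.mod (result * g + pyPow2Mod (PySem.List.pyGetD B_vec (i : Int) 0) m) m)

def brute_P_B_alt (B_vec : List Int) (g : Int) (mod : Int) : Int :=
  pvAltLoop B_vec g mod B_vec.length 0

-- ===== PRECONDITION & SPEC =====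
-- Pre_ excludes exactly the inputs where A raises: mod = 0 on a nonempty list (pow raises ValueError),
-- and a negative exponent with even mod (pow raises ValueError: 2 is not invertible).
def Pre_brute_P_B (B_vec : List Int) (g : Int) (mod : Int) : Prop :=
  (B_vec = [] ∨ mod ≠ 0) ∧ ∀ b ∈ B_vec, 0 ≤ b ∨ mod % 2 = 1
instance (B_vec : List Int) (g_ : Int) (mod : Int) : Decidable (Pre_brute_P_B B_vec g_ mod) := by
  unfold Pre_brute_P_B; infer_instance
def pvWitness_brute_P_B : List Int × Int × Int := ([3, 1, 4], 5, 7)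

def Spec_brute_P_B (B_vec : List Int) (g : Int) (mod : Int) (out : Int) : Prop := out = brute_P_B_alt B_vec g mod
instance (B_vec : List Int) (g : Int) (mod : Int) (out : Int) : Decidable (Spec_brute_P_B B_vec g mod out) := by unfold Spec_brute_P_B; infer_instance

-- ===== CLAIM (what is proved, stated in full; the proofs are below) =====
def Claim_equal_brute_P_B : Prop := ∀ (B_vec : List Int) (g : Int) (mod : Int), Dom_brute_P_B B_vec g mod → Pre_brute_P_B B_vec g mod → Spec_brute_P_B B_vec g mod (brute_P_B B_vec g mod)

-- ===== LEMMAS AND PROOFS =====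

-- m divides x - (x % m) (Python %), for every m.
theorem pv_dvd_sub_pymod (x m : Int) : m ∣ x - PySem.Int.mod x m := by
  have h := PySem.Int.floordiv_mul_add_mod x m
  exact ⟨PySem.Int.floordiv x m, by linarith⟩

-- Python % depends only on the residue class (m ≠ 0).
theorem pv_pymod_congr (a b m : Int) (hm : m ≠ 0) (h : m ∣ a - b) :
    PySem.Int.mod a m = PySem.Int.mod b m := by
  have hd : m ∣ PySem.Int.mod a m - PySem.Int.mod b m := by
    have h1 := pv_dvd_sub_pymod a m
    have h2 := pv_dvd_sub_pymod b m
    have : PySem.Int.mod a m - PySem.Int.mod b m = (a - b) - (a - PySem.Int.mod a m) + (b - PySem.Int.mod b m) := by ring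
    rw [this]
    exact dvd_add (dvd_sub h h1) h2
  rcases hd with ⟨k, hk⟩
  rcases lt_trichotomy m 0 with hneg | hzero | hpos
  · obtain ⟨ha1, ha2⟩ := PySem.Int.mod_neg_bounds a hneg
    obtain ⟨hb1, hb2⟩ := PySem.Int.mod_neg_bounds b hneg
    have hk0 : k = 0 := by nlinarith
    subst hk0
    simp only [mul_zero] at hk
    omega
  · exact absurd hzero hm
  · have ha1 := PySem.Int.mod_nonneg a hpos
    have ha2 := PySem.Int.mod_lt a hpos
    have hb1 := PySem.Int.mod_nonneg b hpos
    have hb2 := PySem.Int.mod_lt b hpos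
    have hk0 : k = 0 := by nlinarith
    subst hk0
    simp only [mul_zero] at hk
    omega

theorem pv_pymod_idem (x m : Int) (hm : m ≠ 0) :
    PySem.Int.mod (PySem.Int.mod x m) m = PySem.Int.mod x m := by
  apply pv_pymod_congr _ _ _ hm
  have h := dvd_neg.mpr (pv_dvd_sub_pymod x m)
  rwa [neg_sub] at h

theorem pv_pymod_zero (m : Int) : PySem.Int.mod 0 m = 0 := by
  simp [PySem.Int.mod]

-- Horner value of the list (what B's index loop computes; bridge lemmas below).
def pvHorner (g m : Int) (l : List Int) : Int :=
  l.foldr (fun b r => PySem.Int.mod (r * g + pyPow2Mod b m) m) 0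

-- B's counter loop, run on the first n elements, is a reversed fold.
theorem pv_altLoop_take (l : List Int) (g m : Int) :
    ∀ n, n ≤ l.length → ∀ r, pvAltLoop l g m n r
      = ((l.take n).reverse).foldl
          (fun r b => PySem.Int.mod (r * g + pyPow2Mod b m) m) r := by
  intro n
  induction n with
  | zero => intro _ r; simp [pvAltLoop]
  | succ i ih =>
      intro hn r
      have hi : i < l.length := hn
      have htake : (l.take (i + 1)).reverse = l[i] :: (l.take i).reverse := by
        rw [List.take_succ]
        simp [List.getElem?_eq_getElem hi]
      simp only [pvAltLoop]
      rw [ih (Nat.le_of_lt hi), htake, List.foldl_cons,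
          PySem.List.pyGetD_natCast, List.getD_eq_getElem l 0 hi]

-- B's value is the Horner value.
theorem pv_alt_eq_horner (l : List Int) (g m : Int) :
    brute_P_B_alt l g m = pvHorner g m l := by
  unfold brute_P_B_alt pvHorner
  rw [pv_altLoop_take l g m l.length le_rfl 0, List.take_length, List.foldl_reverse]

-- A's loop, from any reduced accumulator, computes the Horner value (m ≠ 0).
theorem pv_A_loop (g m : Int) (hm : m ≠ 0) (l : List Int) :
    ∀ r gj : Int, PySem.Int.mod r m = r →
      (l.foldl (fun (st : Int × Int) b =>
          (PySem.Int.mod (st.1 + st.2 * pyPow2Mod b m) m,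
           PySem.Int.mod (st.2 * g) m)) (r, gj)).1
        = PySem.Int.mod (r + gj * pvHorner g m l) m := by
  induction l with
  | nil =>
      intro r gj hr
      simp [pvHorner, hr]
  | cons b l ih =>
      intro r gj hr
      have hred : PySem.Int.mod (PySem.Int.mod (r + gj * pyPow2Mod b m) m) m
          = PySem.Int.mod (r + gj * pyPow2Mod b m) m := pv_pymod_idem _ _ hm
      simp only [List.foldl_cons]
      rw [ih _ _ hred]
      have h1 := pv_dvd_sub_pymod (r + gj * pyPow2Mod b m) m
      have h2 := pv_dvd_sub_pymod (gj * g) m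
      have h3 := pv_dvd_sub_pymod (pvHorner g m l * g + pyPow2Mod b m) m
      apply pv_pymod_congr _ _ _ hm
      have hrw :
          (PySem.Int.mod (r + gj * pyPow2Mod b m) m
             + PySem.Int.mod (gj * g) m * pvHorner g m l)
          - (r + gj * pvHorner g m (b :: l))
          = -((r + gj * pyPow2Mod b m)
                - PySem.Int.mod (r + gj * pyPow2Mod b m) m)
            - (((gj * g) - PySem.Int.mod (gj * g) m) * pvHorner g m l)
            + gj * ((pvHorner g m l * g + pyPow2Mod b m)
                - PySem.Int.mod (pvHorner g m l * g + pyPow2Mod b m) m) := by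
        simp only [pvHorner, List.foldr_cons]
        ring
      rw [hrw]
      exact dvd_add (dvd_sub (dvd_neg.mpr h1) (Dvd.dvd.mul_right h2 _)) (Dvd.dvd.mul_left h3 _)

-- pvHorner is reduced (or 0) — used to drop the outer mod in the verdict.
theorem pv_horner_red (g m : Int) (hm : m ≠ 0) (l : List Int) :
    PySem.Int.mod (pvHorner g m l) m = pvHorner g m l := by
  cases l with
  | nil => exact pv_pymod_zero m
  | cons b l => exact pv_pymod_idem _ _ hm

-- ===== VERDICT (by name: the statement is the Claim_ definition above) =====
theorem brute_P_B_spec : Claim_equal_brute_P_B := by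
  intro B_vec g m _ hpre
  unfold Spec_brute_P_B brute_P_B
  rw [PySem.List.foldl_pyRange_zero_pyGetD' B_vec 0
        (fun (st : Int × Int) b =>
          (PySem.Int.mod (st.1 + st.2 * pyPow2Mod b m) m,
           PySem.Int.mod (st.2 * g) m)) (0, 1)]
  rw [pv_alt_eq_horner]
  rcases hpre.1 with hnil | hm
  · subst hnil; rfl
  · rw [pv_A_loop g m hm B_vec 0 1 (pv_pymod_zero m), zero_add, one_mul]
    exact pv_horner_red g m hm B_vec
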